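-- pv_equiv track=rewrite | github.com/mortyc126-debug/SHA | weapon_bias_amp.py | sha256_t_rounds
-- ===== SOURCE A (Python) =====
-- K = [
--     0x428a2f98, 0x71374491, 0xb5c0fbcf, 0xe9b5dba5,
--     0x3956c25b, 0x59f111f1, 0x923f82a4, 0xab1c5ed5,
--     0xd807aa98, 0x12835b01, 0x243185be, 0x550c7dc3,
--     0x72be5d74, 0x80deb1fe, 0x9bdc06a7, 0xc19bf174,
--     0xe49b69c1, 0xefbe4786, 0x0fc19dc6, 0x240ca1cc,
--     0x2de92c6f, 0x4a7484aa, 0x5cb0a9dc, 0x76f988da,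
--     0x983e5152, 0xa831c66d, 0xb00327c8, 0xbf597fc7,
--     0xc6e00bf3, 0xd5a79147, 0x06ca6351, 0x14292967,
--     0x27b70a85, 0x2e1b2138, 0x4d2c6dfc, 0x53380d13,
--     0x650a7354, 0x766a0abb, 0x81c2c92e, 0x92722c85,
--     0xa2bfe8a1, 0xa81a664b, 0xc24b8b70, 0xc76c51a3,
--     0xd192e819, 0xd6990624, 0xf40e3585, 0x106aa070,
--     0x19a4c116, 0x1e376c08, 0x2748774c, 0x34b0bcb5,
--     0x391c0cb3, 0x4ed8aa4a, 0x5b9cca4f, 0x682e6ff3,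
--     0x748f82ee, 0x78a5636f, 0x84c87814, 0x8cc70208,
--     0x90befffa, 0xa4506ceb, 0xbef9a3f7, 0xc67178f2,
-- ]
--
-- IV = [
--     0x6a09e667, 0xbb67ae85, 0x3c6ef372, 0xa54ff53a,
--     0x510e527f, 0x9b05688c, 0x1f83d9ab, 0x5be0cd19,
-- ]
--
-- MASK32 = 0xFFFFFFFF
--
-- def rotr(x, n):
--     return ((x >> n) | (x << (32 - n))) & MASK32
--
-- def shr(x, n):
--     return x >> n
--
-- def expand_message_schedule(W0_15, num_rounds):
--     W = list(W0_15[:16])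
--     for i in range(16, num_rounds):
--         s0 = rotr(W[i-15], 7) ^ rotr(W[i-15], 18) ^ shr(W[i-15], 3)
--         s1 = rotr(W[i-2], 17) ^ rotr(W[i-2], 19) ^ shr(W[i-2], 10)
--         W.append((W[i-16] + s0 + W[i-7] + s1) & MASK32)
--     return W
--
-- def sha256_t_rounds(msg_words, t):
--     """Run t rounds of SHA-256 from standard IV. Return 8-word state."""
--     W = expand_message_schedule(msg_words, max(t, 16))
--     a, b, c, d, e, f, g, h = IV
--     for i in range(t):
--         S1 = rotr(e, 6) ^ rotr(e, 11) ^ rotr(e, 25)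
--         ch = (e & f) ^ ((~e) & MASK32 & g)
--         temp1 = (h + S1 + ch + K[i] + W[i]) & MASK32
--         S0 = rotr(a, 2) ^ rotr(a, 13) ^ rotr(a, 22)
--         maj = (a & b) ^ (a & c) ^ (b & c)
--         temp2 = (S0 + maj) & MASK32
--         h = g; g = f; f = e
--         e = (d + temp1) & MASK32
--         d = c; c = b; b = a
--         a = (temp1 + temp2) & MASK32
--     return [a, b, c, d, e, f, g, h]
-- ===== SOURCE B (Python) =====
-- K = [
--     0x428a2f98, 0x71374491, 0xb5c0fbcf, 0xe9b5dba5,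
--     0x3956c25b, 0x59f111f1, 0x923f82a4, 0xab1c5ed5,
--     0xd807aa98, 0x12835b01, 0x243185be, 0x550c7dc3,
--     0x72be5d74, 0x80deb1fe, 0x9bdc06a7, 0xc19bf174,
--     0xe49b69c1, 0xefbe4786, 0x0fc19dc6, 0x240ca1cc,
--     0x2de92c6f, 0x4a7484aa, 0x5cb0a9dc, 0x76f988da,
--     0x983e5152, 0xa831c66d, 0xb00327c8, 0xbf597fc7,
--     0xc6e00bf3, 0xd5a79147, 0x06ca6351, 0x14292967,
--     0x27b70a85, 0x2e1b2138, 0x4d2c6dfc, 0x53380d13,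
--     0x650a7354, 0x766a0abb, 0x81c2c92e, 0x92722c85,
--     0xa2bfe8a1, 0xa81a664b, 0xc24b8b70, 0xc76c51a3,
--     0xd192e819, 0xd6990624, 0xf40e3585, 0x106aa070,
--     0x19a4c116, 0x1e376c08, 0x2748774c, 0x34b0bcb5,
--     0x391c0cb3, 0x4ed8aa4a, 0x5b9cca4f, 0x682e6ff3,
--     0x748f82ee, 0x78a5636f, 0x84c87814, 0x8cc70208,
--     0x90befffa, 0xa4506ceb, 0xbef9a3f7, 0xc67178f2,
-- ]
--
-- IV = [
--     0x6a09e667, 0xbb67ae85, 0x3c6ef372, 0xa54ff53a,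
--     0x510e527f, 0x9b05688c, 0x1f83d9ab, 0x5be0cd19,
-- ]
--
-- MASK32 = 0xFFFFFFFF
--
-- def rotr(x, n):
--     return ((x >> n) | (x << (32 - n))) & MASK32
--
-- def shr(x, n):
--     return x >> n
--
-- def sha256_t_rounds(msg_words, t):
--     """Run t rounds of SHA-256 from standard IV. Return 8-word state.
--
--     Fused variant: the message schedule is produced on the fly inside the
--     round loop from a rolling window of the 16 most recent schedule words,
--     so no full schedule list is ever materialised."""
--     a, b, c, d, e, f, g, h = IV
--     w16 = []  # the last up-to-16 schedule words
--     for i in range(t):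
--         if i < 16:
--             wi = msg_words[i]
--         else:
--             s0 = rotr(w16[1], 7) ^ rotr(w16[1], 18) ^ shr(w16[1], 3)
--             s1 = rotr(w16[14], 17) ^ rotr(w16[14], 19) ^ shr(w16[14], 10)
--             wi = (w16[0] + s0 + w16[9] + s1) & MASK32
--         w16.append(wi)
--         if len(w16) > 16:
--             w16.pop(0)
--         S1 = rotr(e, 6) ^ rotr(e, 11) ^ rotr(e, 25)
--         ch = (e & f) ^ ((~e) & MASK32 & g)
--         temp1 = (h + S1 + ch + K[i] + wi) & MASK32
--         S0 = rotr(a, 2) ^ rotr(a, 13) ^ rotr(a, 22)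
--         maj = (a & b) ^ (a & c) ^ (b & c)
--         temp2 = (S0 + maj) & MASK32
--         h = g; g = f; f = e
--         e = (d + temp1) & MASK32
--         d = c; c = b; b = a
--         a = (temp1 + temp2) & MASK32
--     return [a, b, c, d, e, f, g, h]
-- ===== Notes on version B (the rewrite author's own statement) =====
-- stated objective: alternative
-- what changed: B fuses the separate message-schedule expansion pass into the single round loop, deriving each schedule word on the fly from a rolling window of the 16 most recent words instead of materialising A's precomputed schedule list.
import Mathlib
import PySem

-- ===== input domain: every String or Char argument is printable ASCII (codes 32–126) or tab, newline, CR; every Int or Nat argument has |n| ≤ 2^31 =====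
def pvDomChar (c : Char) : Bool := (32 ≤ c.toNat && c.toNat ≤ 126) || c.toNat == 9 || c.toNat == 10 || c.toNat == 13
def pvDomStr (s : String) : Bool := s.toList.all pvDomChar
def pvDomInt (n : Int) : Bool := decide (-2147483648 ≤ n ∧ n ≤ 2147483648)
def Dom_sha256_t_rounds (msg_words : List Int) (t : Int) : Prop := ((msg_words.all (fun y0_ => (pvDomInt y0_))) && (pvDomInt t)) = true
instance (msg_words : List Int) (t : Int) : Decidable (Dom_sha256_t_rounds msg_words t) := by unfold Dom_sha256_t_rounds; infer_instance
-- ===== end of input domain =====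

-- B fuses the message-schedule expansion into the round loop with a rolling 16-word
-- window, so the precomputed schedule list of A is never materialised (alternative
-- decomposition, same exact values).

-- ===== PORT A =====
-- Module-level helpers shared by both Python sources (K, IV, MASK32, rotr, shr).
abbrev pvOct := Int × Int × Int × Int × Int × Int × Int × Int

def pvMASK32 : Int := 0xFFFFFFFF

def pvK : List Int := [
  0x428a2f98, 0x71374491, 0xb5c0fbcf, 0xe9b5dba5,
  0x3956c25b, 0x59f111f1, 0x923f82a4, 0xab1c5ed5,
  0xd807aa98, 0x12835b01, 0x243185be, 0x550c7dc3,
  0x72be5d74, 0x80deb1fe, 0x9bdc06a7, 0xc19bf174,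
  0xe49b69c1, 0xefbe4786, 0x0fc19dc6, 0x240ca1cc,
  0x2de92c6f, 0x4a7484aa, 0x5cb0a9dc, 0x76f988da,
  0x983e5152, 0xa831c66d, 0xb00327c8, 0xbf597fc7,
  0xc6e00bf3, 0xd5a79147, 0x06ca6351, 0x14292967,
  0x27b70a85, 0x2e1b2138, 0x4d2c6dfc, 0x53380d13,
  0x650a7354, 0x766a0abb, 0x81c2c92e, 0x92722c85,
  0xa2bfe8a1, 0xa81a664b, 0xc24b8b70, 0xc76c51a3,
  0xd192e819, 0xd6990624, 0xf40e3585, 0x106aa070,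
  0x19a4c116, 0x1e376c08, 0x2748774c, 0x34b0bcb5,
  0x391c0cb3, 0x4ed8aa4a, 0x5b9cca4f, 0x682e6ff3,
  0x748f82ee, 0x78a5636f, 0x84c87814, 0x8cc70208,
  0x90befffa, 0xa4506ceb, 0xbef9a3f7, 0xc67178f2]

-- a, b, c, d, e, f, g, h = IV  (the 8-word standard IV, unpacked)
def pvIVt : pvOct :=
  (0x6a09e667, 0xbb67ae85, 0x3c6ef372, 0xa54ff53a,
   0x510e527f, 0x9b05688c, 0x1f83d9ab, 0x5be0cd19)

-- rotr/shr: every call site passes a literal 0 < n < 32, so the Nat shift amount is exact.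
def pvrotr (x : Int) (n : Nat) : Int :=
  PySem.Int.band (PySem.Int.bor (x >>> n) (x <<< (32 - n))) pvMASK32

def pvshr (x : Int) (n : Nat) : Int := x >>> n

-- xs[i]: Pre_ excludes every input on which Python's indexing raises, so the default is never read.
def pvget (xs : List Int) (i : Int) : Int := PySem.List.pyGetD xs i 0

def pvexpand (W0_15 : List Int) (num_rounds : Int) : List Int :=
  (PySem.List.pyRange 16 num_rounds 1).foldl
    (fun W i =>
      let s0 := PySem.Int.bxor (PySem.Int.bxor (pvrotr (pvget W (i - 15)) 7)
                  (pvrotr (pvget W (i - 15)) 18)) (pvshr (pvget W (i - 15)) 3)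
      let s1 := PySem.Int.bxor (PySem.Int.bxor (pvrotr (pvget W (i - 2)) 17)
                  (pvrotr (pvget W (i - 2)) 19)) (pvshr (pvget W (i - 2)) 10)
      W ++ [PySem.Int.band (pvget W (i - 16) + s0 + pvget W (i - 7) + s1) pvMASK32])
    (PySem.List.slice W0_15 none (some 16))

def sha256_t_rounds (msg_words : List Int) (t : Int) : List Int :=
  let W := pvexpand msg_words (max t 16)
  let s := (PySem.List.pyRange 0 t 1).foldl
    (fun (st : pvOct) (i : Int) =>
      match st with
      | (a, b, c, d, e, f, g, h) =>
        let S1 := PySem.Int.bxor (PySem.Int.bxor (pvrotr e 6) (pvrotr e 11)) (pvrotr e 25)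
        let ch := PySem.Int.bxor (PySem.Int.band e f)
                    (PySem.Int.band (PySem.Int.band (Int.not e) pvMASK32) g)
        let temp1 := PySem.Int.band (h + S1 + ch + pvget pvK i + pvget W i) pvMASK32
        let S0 := PySem.Int.bxor (PySem.Int.bxor (pvrotr a 2) (pvrotr a 13)) (pvrotr a 22)
        let maj := PySem.Int.bxor (PySem.Int.bxor (PySem.Int.band a b) (PySem.Int.band a c))
                     (PySem.Int.band b c)
        let temp2 := PySem.Int.band (S0 + maj) pvMASK32
        (PySem.Int.band (temp1 + temp2) pvMASK32, a, b, c,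
         PySem.Int.band (d + temp1) pvMASK32, e, f, g))
    pvIVt
  [s.1, s.2.1, s.2.2.1, s.2.2.2.1, s.2.2.2.2.1, s.2.2.2.2.2.1, s.2.2.2.2.2.2.1, s.2.2.2.2.2.2.2]

-- ===== PORT B =====
def sha256_t_rounds_alt (msg_words : List Int) (t : Int) : List Int :=
  let r := (PySem.List.pyRange 0 t 1).foldl
    (fun (ws : List Int × pvOct) (i : Int) =>
      match ws with
      | (w16, (a, b, c, d, e, f, g, h)) =>
        let wi := if i < 16 then pvget msg_words i
          else
            let s0 := PySem.Int.bxor (PySem.Int.bxor (pvrotr (pvget w16 1) 7)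
                        (pvrotr (pvget w16 1) 18)) (pvshr (pvget w16 1) 3)
            let s1 := PySem.Int.bxor (PySem.Int.bxor (pvrotr (pvget w16 14) 17)
                        (pvrotr (pvget w16 14) 19)) (pvshr (pvget w16 14) 10)
            PySem.Int.band (pvget w16 0 + s0 + pvget w16 9 + s1) pvMASK32
        let w' := w16 ++ [wi]
        -- w16.pop(0) when the window exceeds 16 words
        let w'' := if 16 < w'.length then w'.tail else w'
        let S1 := PySem.Int.bxor (PySem.Int.bxor (pvrotr e 6) (pvrotr e 11)) (pvrotr e 25)
        let ch := PySem.Int.bxor (PySem.Int.band e f)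
                    (PySem.Int.band (PySem.Int.band (Int.not e) pvMASK32) g)
        let temp1 := PySem.Int.band (h + S1 + ch + pvget pvK i + wi) pvMASK32
        let S0 := PySem.Int.bxor (PySem.Int.bxor (pvrotr a 2) (pvrotr a 13)) (pvrotr a 22)
        let maj := PySem.Int.bxor (PySem.Int.bxor (PySem.Int.band a b) (PySem.Int.band a c))
                     (PySem.Int.band b c)
        let temp2 := PySem.Int.band (S0 + maj) pvMASK32
        (w'', (PySem.Int.band (temp1 + temp2) pvMASK32, a, b, c,
               PySem.Int.band (d + temp1) pvMASK32, e, f, g)))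
    ([], pvIVt)
  let s := r.2
  [s.1, s.2.1, s.2.2.1, s.2.2.2.1, s.2.2.2.2.1, s.2.2.2.2.2.1, s.2.2.2.2.2.2.1, s.2.2.2.2.2.2.2]

-- ===== PRECONDITION & SPEC =====
-- Pre_ = exactly the inputs on which the Python A returns (everywhere else it raises
-- IndexError: t ≥ 65 indexes K[64]; 0 < t ≤ 16 needs t message words; t > 16 needs 16).
def Pre_sha256_t_rounds (msg_words : List Int) (t : Int) : Prop :=
  t ≤ 64 ∧ (t ≤ 0 ∨ (t ≤ 16 ∧ t ≤ msg_words.length) ∨ 16 ≤ msg_words.length)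

instance (msg_words : List Int) (t : Int) : Decidable (Pre_sha256_t_rounds msg_words t) := by
  unfold Pre_sha256_t_rounds; infer_instance

def pvWitness_sha256_t_rounds : List Int × Int :=
  ([1, 2, 3, 4, 5, 6, 7, 8, 9, 10, 11, 12, 13, 14, 15, 16], 20)

def Spec_sha256_t_rounds (msg_words : List Int) (t : Int) (out : List Int) : Prop := out = sha256_t_rounds_alt msg_words t
instance (msg_words : List Int) (t : Int) (out : List Int) : Decidable (Spec_sha256_t_rounds msg_words t out) := by unfold Spec_sha256_t_rounds; infer_instance

-- ===== CLAIM (what is proved, stated in full; the proofs are below) =====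
def Claim_equal_sha256_t_rounds : Prop := ∀ (msg_words : List Int) (t : Int), Dom_sha256_t_rounds msg_words t → Pre_sha256_t_rounds msg_words t → Spec_sha256_t_rounds msg_words t (sha256_t_rounds msg_words t)

-- ===== LEMMAS AND PROOFS =====

-- The schedule word W[i] as a recursive function of the index.
def schedW (xs : List Int) (i : Nat) : Int :=
  if _h : i < 16 then pvget xs (i : Int)
  else
    let w15 := schedW xs (i - 15)
    let w2 := schedW xs (i - 2)
    let s0 := PySem.Int.bxor (PySem.Int.bxor (pvrotr w15 7) (pvrotr w15 18)) (pvshr w15 3)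
    let s1 := PySem.Int.bxor (PySem.Int.bxor (pvrotr w2 17) (pvrotr w2 19)) (pvshr w2 10)
    PySem.Int.band (schedW xs (i - 16) + s0 + schedW xs (i - 7) + s1) pvMASK32
termination_by i
decreasing_by all_goals omega

-- One compression round with round constant ki and schedule word wi.
def pvround (ki wi : Int) (st : pvOct) : pvOct :=
  match st with
  | (a, b, c, d, e, f, g, h) =>
    let S1 := PySem.Int.bxor (PySem.Int.bxor (pvrotr e 6) (pvrotr e 11)) (pvrotr e 25)
    let ch := PySem.Int.bxor (PySem.Int.band e f)
                (PySem.Int.band (PySem.Int.band (Int.not e) pvMASK32) g)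
    let temp1 := PySem.Int.band (h + S1 + ch + ki + wi) pvMASK32
    let S0 := PySem.Int.bxor (PySem.Int.bxor (pvrotr a 2) (pvrotr a 13)) (pvrotr a 22)
    let maj := PySem.Int.bxor (PySem.Int.bxor (PySem.Int.band a b) (PySem.Int.band a c))
                 (PySem.Int.band b c)
    let temp2 := PySem.Int.band (S0 + maj) pvMASK32
    (PySem.Int.band (temp1 + temp2) pvMASK32, a, b, c,
     PySem.Int.band (d + temp1) pvMASK32, e, f, g)

def pvroundSched (xs : List Int) (st : pvOct) (k : Nat) : pvOct :=
  pvround (pvget pvK (k : Int)) (schedW xs k) st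

-- B's rolling window after n rounds: the last (up to) 16 schedule words.
def windowAt (xs : List Int) (n : Nat) : List Int :=
  ((List.range n).map (schedW xs)).drop (n - 16)

theorem schedW_lt16 (xs : List Int) (i : Nat) (h : i < 16) :
    schedW xs i = pvget xs (i : Int) := by
  rw [schedW]; simp [h]

theorem schedW_ge16 (xs : List Int) (i : Nat) (h : 16 ≤ i) :
    schedW xs i =
      PySem.Int.band (schedW xs (i - 16) +
          (PySem.Int.bxor (PySem.Int.bxor (pvrotr (schedW xs (i - 15)) 7)
            (pvrotr (schedW xs (i - 15)) 18)) (pvshr (schedW xs (i - 15)) 3)) +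
          schedW xs (i - 7) +
          (PySem.Int.bxor (PySem.Int.bxor (pvrotr (schedW xs (i - 2)) 17)
            (pvrotr (schedW xs (i - 2)) 19)) (pvshr (schedW xs (i - 2)) 10))) pvMASK32 := by
  conv_lhs => rw [schedW]
  rw [dif_neg (by omega : ¬ i < 16)]

theorem pvget_map_range (f : Nat → Int) (n k : Nat) (hk : k < n) :
    pvget ((List.range n).map f) (k : Int) = f k := by
  simp [pvget, PySem.List.pyGetD_natCast, List.getD_eq_getElem?_getD, hk]

theorem pvget_take16 (xs : List Int) (i : Nat) (hi : i < 16) :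
    pvget (xs.take 16) (i : Int) = pvget xs (i : Int) := by
  simp [pvget, PySem.List.pyGetD_natCast, List.getD_eq_getElem?_getD, hi]

theorem windowAt_zero_sub (xs : List Int) (n : Nat) (hn : n ≤ 16) :
    windowAt xs n = (List.range n).map (schedW xs) := by
  unfold windowAt
  rw [show n - 16 = 0 by omega, List.drop_zero]

theorem windowAt_length (xs : List Int) (n : Nat) (hn : 16 ≤ n) :
    (windowAt xs n).length = 16 := by
  simp [windowAt]; omega

theorem windowAt_get (xs : List Int) (n j : Nat) (hn : 16 ≤ n) (hj : j < 16) :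
    pvget (windowAt xs n) (j : Int) = schedW xs (n - 16 + j) := by
  have hm : n - 16 + j < n := by omega
  have : (windowAt xs n)[j]? = some (schedW xs (n - 16 + j)) := by
    rw [windowAt, List.getElem?_drop, List.getElem?_map, List.getElem?_range hm,
      Option.map_some]
  simp [pvget, PySem.List.pyGetD_natCast, List.getD_eq_getElem?_getD, this]

theorem pvexpand_16 (xs : List Int) : pvexpand xs (16 : Int) = xs.take 16 := by
  rw [pvexpand, PySem.List.pyRange_one_eq_nil (by norm_num), List.foldl_nil,
    PySem.List.slice_to xs (by norm_num)]
  rfl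


theorem B_step (xs : List Int) (n : Nat) (s : pvOct) :
    (fun (ws : List Int × pvOct) (i : Int) =>
        match ws with
        | (w16, (a, b, c, d, e, f, g, h)) =>
          let wi := if i < 16 then pvget xs i
            else
              let s0 := PySem.Int.bxor (PySem.Int.bxor (pvrotr (pvget w16 1) 7)
                          (pvrotr (pvget w16 1) 18)) (pvshr (pvget w16 1) 3)
              let s1 := PySem.Int.bxor (PySem.Int.bxor (pvrotr (pvget w16 14) 17)
                          (pvrotr (pvget w16 14) 19)) (pvshr (pvget w16 14) 10)
              PySem.Int.band (pvget w16 0 + s0 + pvget w16 9 + s1) pvMASK32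
          let w' := w16 ++ [wi]
          let w'' := if 16 < w'.length then w'.tail else w'
          let S1 := PySem.Int.bxor (PySem.Int.bxor (pvrotr e 6) (pvrotr e 11)) (pvrotr e 25)
          let ch := PySem.Int.bxor (PySem.Int.band e f)
                      (PySem.Int.band (PySem.Int.band (Int.not e) pvMASK32) g)
          let temp1 := PySem.Int.band (h + S1 + ch + pvget pvK i + wi) pvMASK32
          let S0 := PySem.Int.bxor (PySem.Int.bxor (pvrotr a 2) (pvrotr a 13)) (pvrotr a 22)
          let maj := PySem.Int.bxor (PySem.Int.bxor (PySem.Int.band a b) (PySem.Int.band a c))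
                       (PySem.Int.band b c)
          let temp2 := PySem.Int.band (S0 + maj) pvMASK32
          (w'', (PySem.Int.band (temp1 + temp2) pvMASK32, a, b, c,
                 PySem.Int.band (d + temp1) pvMASK32, e, f, g)))
      (windowAt xs n, s) ((n : Nat) : Int)
    = (windowAt xs (n + 1), pvroundSched xs s n) := by
  obtain ⟨a, b, c, d, e, f, g, h⟩ := s
  by_cases hn : n < 16
  · have hi : ((n : Nat) : Int) < 16 := by exact_mod_cast hn
    simp only [if_pos hi]
    rw [windowAt_zero_sub xs n (by omega), windowAt_zero_sub xs (n + 1) (by omega)]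
    have hlen : ¬ 16 < ((List.range n).map (schedW xs) ++ [pvget xs ((n : Nat) : Int)]).length := by
      simp; omega
    simp only [if_neg hlen]
    rw [List.range_succ, List.map_append, List.map_singleton, schedW_lt16 xs n hn]
    simp only [pvroundSched, pvround, schedW_lt16 xs n hn]
  · have hn16 : 16 ≤ n := by omega
    have hi : ¬ (((n : Nat) : Int) < 16) := by omega
    simp only [if_neg hi]
    have g1 : pvget (windowAt xs n) 1 = schedW xs (n - 15) := by
      have := windowAt_get xs n 1 hn16 (by norm_num)
      rw [show ((1 : Nat) : Int) = (1 : Int) by norm_num, show n - 16 + 1 = n - 15 by omega] at this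
      exact this
    have g14 : pvget (windowAt xs n) 14 = schedW xs (n - 2) := by
      have := windowAt_get xs n 14 hn16 (by norm_num)
      rw [show ((14 : Nat) : Int) = (14 : Int) by norm_num, show n - 16 + 14 = n - 2 by omega] at this
      exact this
    have g0 : pvget (windowAt xs n) 0 = schedW xs (n - 16) := by
      have := windowAt_get xs n 0 hn16 (by norm_num)
      rw [show ((0 : Nat) : Int) = (0 : Int) by norm_num, show n - 16 + 0 = n - 16 by omega] at this
      exact this
    have g9 : pvget (windowAt xs n) 9 = schedW xs (n - 7) := by
      have := windowAt_get xs n 9 hn16 (by norm_num)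
      rw [show ((9 : Nat) : Int) = (9 : Int) by norm_num, show n - 16 + 9 = n - 7 by omega] at this
      exact this
    rw [g1, g14, g0, g9, ← schedW_ge16 xs n hn16]
    have hlen : 16 < (windowAt xs n ++ [schedW xs n]).length := by
      rw [List.length_append, windowAt_length xs n hn16]; simp
    simp only [if_pos hlen]
    have hwin : (windowAt xs n ++ [schedW xs n]).tail = windowAt xs (n + 1) := by
      have hsp : windowAt xs n ++ [schedW xs n]
          = ((List.range (n + 1)).map (schedW xs)).drop (n - 16) := by
        rw [List.range_succ, List.map_append, List.map_singleton, windowAt,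
          List.drop_append_of_le_length (by simp)]
      rw [hsp, List.tail_drop, windowAt, show n - 16 + 1 = n + 1 - 16 by omega]
    rw [hwin]
    simp only [pvroundSched, pvround]

-- A's expanded schedule is the schedule function on an initial range.
theorem expand_eq (xs : List Int) (hL : 16 ≤ xs.length) :
    ∀ n : Nat, 16 ≤ n → pvexpand xs (n : Int) = (List.range n).map (schedW xs) := by
  intro n hn
  induction n, hn using Nat.le_induction with
  | base =>
    rw [show ((16 : Nat) : Int) = (16 : Int) by norm_num, pvexpand_16]
    apply List.ext_getElem
    · simpa using by omega
    · intro k h1 h2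
      have hk : k < 16 := by simpa using h2
      have hkL : k < xs.length := by simp at h1; omega
      have : schedW xs k = pvget xs (k : Int) := schedW_lt16 xs k hk
      simp [this, pvget, PySem.List.pyGetD_natCast, List.getD_eq_getElem?_getD,
        List.getElem?_eq_getElem hkL]
  | succ n hn ih =>
    rw [pvexpand] at ih ⊢
    rw [show ((n + 1 : Nat) : Int) = (n : Int) + 1 by push_cast; ring,
      PySem.List.pyRange_one_succ_right (by exact_mod_cast hn : (16:Int) ≤ (n : Int)),
      List.foldl_append, ih, List.foldl_cons, List.foldl_nil]
    have e15 : (n : Int) - 15 = ((n - 15 : Nat) : Int) := by omega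
    have e2 : (n : Int) - 2 = ((n - 2 : Nat) : Int) := by omega
    have e16 : (n : Int) - 16 = ((n - 16 : Nat) : Int) := by omega
    have e7 : (n : Int) - 7 = ((n - 7 : Nat) : Int) := by omega
    rw [e15, e2, e16, e7,
      pvget_map_range _ _ _ (by omega), pvget_map_range _ _ _ (by omega),
      pvget_map_range _ _ _ (by omega), pvget_map_range _ _ _ (by omega),
      List.range_succ, List.map_append, List.map_singleton]
    rw [schedW_ge16 xs n hn]

-- A's round loop, once every W-lookup it performs is known, is the canonical fold.
theorem A_loop_eq (xs W : List Int) (t' : Nat)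
    (hW : ∀ i, i < t' → pvget W (i : Int) = schedW xs i) (st : pvOct) :
    (PySem.List.pyRange 0 (t' : Int) 1).foldl
      (fun (st : pvOct) (i : Int) =>
        match st with
        | (a, b, c, d, e, f, g, h) =>
          let S1 := PySem.Int.bxor (PySem.Int.bxor (pvrotr e 6) (pvrotr e 11)) (pvrotr e 25)
          let ch := PySem.Int.bxor (PySem.Int.band e f)
                      (PySem.Int.band (PySem.Int.band (Int.not e) pvMASK32) g)
          let temp1 := PySem.Int.band (h + S1 + ch + pvget pvK i + pvget W i) pvMASK32
          let S0 := PySem.Int.bxor (PySem.Int.bxor (pvrotr a 2) (pvrotr a 13)) (pvrotr a 22)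
          let maj := PySem.Int.bxor (PySem.Int.bxor (PySem.Int.band a b) (PySem.Int.band a c))
                       (PySem.Int.band b c)
          let temp2 := PySem.Int.band (S0 + maj) pvMASK32
          (PySem.Int.band (temp1 + temp2) pvMASK32, a, b, c,
           PySem.Int.band (d + temp1) pvMASK32, e, f, g)) st
    = (List.range t').foldl (pvroundSched xs) st := by
  rw [PySem.List.pyRange_zero_natCast, List.foldl_map]
  apply PySem.List.foldl_congr_mem
  intro acc k hk
  have hk' : k < t' := List.mem_range.mp hk
  obtain ⟨a, b, c, d, e, f, g, h⟩ := acc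
  simp only [pvroundSched, pvround, hW k hk']

-- B's fused loop keeps the window = the last 16 schedule words while the state
-- follows the canonical fold.
theorem B_loop_eq (xs : List Int) (n : Nat) :
    (PySem.List.pyRange 0 (n : Int) 1).foldl
      (fun (ws : List Int × pvOct) (i : Int) =>
        match ws with
        | (w16, (a, b, c, d, e, f, g, h)) =>
          let wi := if i < 16 then pvget xs i
            else
              let s0 := PySem.Int.bxor (PySem.Int.bxor (pvrotr (pvget w16 1) 7)
                          (pvrotr (pvget w16 1) 18)) (pvshr (pvget w16 1) 3)
              let s1 := PySem.Int.bxor (PySem.Int.bxor (pvrotr (pvget w16 14) 17)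
                          (pvrotr (pvget w16 14) 19)) (pvshr (pvget w16 14) 10)
              PySem.Int.band (pvget w16 0 + s0 + pvget w16 9 + s1) pvMASK32
          let w' := w16 ++ [wi]
          let w'' := if 16 < w'.length then w'.tail else w'
          let S1 := PySem.Int.bxor (PySem.Int.bxor (pvrotr e 6) (pvrotr e 11)) (pvrotr e 25)
          let ch := PySem.Int.bxor (PySem.Int.band e f)
                      (PySem.Int.band (PySem.Int.band (Int.not e) pvMASK32) g)
          let temp1 := PySem.Int.band (h + S1 + ch + pvget pvK i + wi) pvMASK32
          let S0 := PySem.Int.bxor (PySem.Int.bxor (pvrotr a 2) (pvrotr a 13)) (pvrotr a 22)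
          let maj := PySem.Int.bxor (PySem.Int.bxor (PySem.Int.band a b) (PySem.Int.band a c))
                       (PySem.Int.band b c)
          let temp2 := PySem.Int.band (S0 + maj) pvMASK32
          (w'', (PySem.Int.band (temp1 + temp2) pvMASK32, a, b, c,
                 PySem.Int.band (d + temp1) pvMASK32, e, f, g)))
      ([], pvIVt)
    = (windowAt xs n, (List.range n).foldl (pvroundSched xs) pvIVt) := by
  rw [PySem.List.pyRange_zero_natCast, List.foldl_map]
  induction n with
  | zero => rfl
  | succ n ih =>
    rw [List.range_succ, List.foldl_append, List.foldl_append, ih,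
      List.foldl_cons, List.foldl_nil, List.foldl_cons, List.foldl_nil]
    exact B_step xs n _

-- Equality of the two ports, given the schedule lookups A performs.
theorem main_eq (xs : List Int) (t' : Nat)
    (hW : ∀ i, i < t' → pvget (pvexpand xs (max ((t' : Int)) 16)) (i : Int) = schedW xs i) :
    sha256_t_rounds xs (t' : Int) = sha256_t_rounds_alt xs (t' : Int) := by
  simp only [sha256_t_rounds, sha256_t_rounds_alt]
  rw [A_loop_eq xs _ t' hW, B_loop_eq xs t']

-- ===== VERDICT (by name: the statement is the Claim_ definition above) =====
theorem sha256_t_rounds_spec : Claim_equal_sha256_t_rounds := by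
  intro xs t _hDom hPre
  unfold Spec_sha256_t_rounds
  obtain ⟨h64, hcase⟩ := hPre
  by_cases ht : t ≤ 0
  · simp only [sha256_t_rounds, sha256_t_rounds_alt,
      PySem.List.pyRange_one_eq_nil ht, List.foldl_nil]
  · have htc : ((t.toNat : Nat) : Int) = t := Int.toNat_of_nonneg (by omega)
    rw [← htc]
    set t' := t.toNat with ht'
    by_cases h16 : t ≤ 16
    · have hmax : max ((t' : Int)) 16 = (16 : Int) := max_eq_right (by omega)
      apply main_eq
      intro i hi
      rw [hmax, pvexpand_16, pvget_take16 xs i (by omega), ← schedW_lt16 xs i (by omega)]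
    · have hL : 16 ≤ xs.length := by
        rcases hcase with h | ⟨h1, _⟩ | h
        · omega
        · omega
        · exact h
      have hmax : max ((t' : Int)) 16 = (t' : Int) := max_eq_left (by omega)
      apply main_eq
      intro i hi
      rw [hmax, expand_eq xs hL t' (by omega), pvget_map_range _ _ _ hi]
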